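-- pv_equiv track=rewrite | github.com/mmakaay/adventofcode2021 | 17-fire-in-the-hole/2.py | group_by_step
-- ===== SOURCE A (Python) =====
-- from itertools import groupby
--
-- def group_by_step(options):
--   def by_step(option):
--     value, step = option
--     return step
--   sorted_options = sorted(options, key=by_step)
--   grouped_options = groupby(sorted_options, key=by_step)
--   return dict(
--     (step, [o for o,_ in options])
--     for step,options in grouped_options
--   )
-- ===== SOURCE B (Python) =====
-- def group_by_step(options):
--   buckets = {}
--   for value, step in options:
--     buckets[step] = buckets.get(step, []) + [value]
--   return dict(sorted(buckets.items(), key=lambda item: item[0]))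
-- ===== Notes on version B (the rewrite author's own statement) =====
-- stated objective: idiomatic
-- what changed: Replaces sort-everything-then-groupby with a single-pass accumulation into a buckets dict followed by sorting only the distinct keys.
import Mathlib
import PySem

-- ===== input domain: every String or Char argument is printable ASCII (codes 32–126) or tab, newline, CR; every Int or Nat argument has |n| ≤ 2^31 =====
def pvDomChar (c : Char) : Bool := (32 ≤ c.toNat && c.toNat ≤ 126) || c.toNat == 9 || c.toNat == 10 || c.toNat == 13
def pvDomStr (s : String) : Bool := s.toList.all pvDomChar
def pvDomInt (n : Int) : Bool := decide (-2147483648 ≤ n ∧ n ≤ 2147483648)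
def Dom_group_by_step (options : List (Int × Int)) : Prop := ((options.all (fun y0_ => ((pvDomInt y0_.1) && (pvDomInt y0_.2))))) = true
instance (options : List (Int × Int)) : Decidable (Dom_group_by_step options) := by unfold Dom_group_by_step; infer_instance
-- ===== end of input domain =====

-- B replaces sort-all-then-groupby by a single-pass bucket accumulation followed by sorting
-- only the distinct keys (idiomatic; same return value).

-- ===== PORT A =====
-- itertools.groupby(l, key=by_step) consumed group by group: consecutive runs of equal key.
def pyGroupby : List (Int × Int) → List (Int × List (Int × Int))
  | [] => []
  | x :: xs =>
    (x.2, x :: xs.takeWhile (fun y => y.2 == x.2)) ::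
      pyGroupby (xs.dropWhile (fun y => y.2 == x.2))
termination_by l => l.length
decreasing_by
  simp only [List.length_cons]
  exact Nat.lt_succ_of_le (List.length_dropWhile_le _ _)

def group_by_step (options : List (Int × Int)) : List (Int × List Int) :=
  let sorted_options := PySem.List.sorted options (fun option => option.2)
  let grouped_options := pyGroupby sorted_options
  (PySem.Dict.ofList
    (grouped_options.map (fun g => (g.1, g.2.map (fun o => o.1))))).items

-- ===== PORT B =====
def group_by_step_alt (options : List (Int × Int)) : List (Int × List Int) :=
  let buckets :=
    options.foldl (fun d p => d.modify p.2 [] (fun l => l ++ [p.1])) PySem.Dict.empty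
  (PySem.Dict.ofList (PySem.List.sorted buckets.items (fun item => item.1))).items

-- ===== PRECONDITION & SPEC =====
def Spec_group_by_step (options : List (Int × Int)) (out : List (Int × List Int)) : Prop := out = group_by_step_alt options
instance (options : List (Int × Int)) (out : List (Int × List Int)) : Decidable (Spec_group_by_step options out) := by unfold Spec_group_by_step; infer_instance

-- ===== CLAIM (what is proved, stated in full; the proofs are below) =====
def Claim_equal_group_by_step : Prop := ∀ (options : List (Int × Int)), Dom_group_by_step options → Spec_group_by_step options (group_by_step options)

-- ===== LEMMAS AND PROOFS =====

-- The common canonical value: distinct steps sorted ascending, each paired with the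
-- values carrying that step, in encounter order.
def canonKeys (options : List (Int × Int)) : List Int :=
  PySem.List.sorted (PySem.Set.ofList (options.map (fun y => y.2))) (fun x => x)

def canonGroup (options : List (Int × Int)) (k : Int) : List Int :=
  (options.filter (fun y => y.2 == k)).map (fun y => y.1)

def canon (options : List (Int × Int)) : List (Int × List Int) :=
  (canonKeys options).map (fun k => (k, canonGroup options k))

lemma canon_map_fst (options : List (Int × Int)) :
    (canon options).map (fun p => p.1) = canonKeys options := by
  simp [canon, Function.comp_def]

lemma canon_pairwise_lt (options : List (Int × Int)) :
    (canon options).Pairwise (fun a b => a.1 < b.1) := by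
  have h := PySem.List.sorted_ofList_pairwise_lt (options.map (fun y => y.2))
  exact List.Pairwise.map _ (fun a b hab => hab) h

lemma canon_keys_nodup (options : List (Int × Int)) :
    ((canon options).map (fun p => p.1)).Nodup := by
  rw [canon_map_fst]
  exact List.Pairwise.imp (fun {a b} h => ne_of_lt h)
    (PySem.List.sorted_ofList_pairwise_lt (options.map (fun y => y.2)))

-- Dict.ofList on pairs with distinct keys returns exactly those pairs as items.
lemma items_ofList_nodup (pairs : List (Int × List Int))
    (h : (pairs.map (fun p => p.1)).Nodup) :
    (PySem.Dict.ofList pairs).items = pairs := by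
  have := PySem.Dict.items_foldl_insert_fresh pairs (fun p => p.1) (fun p => p.2)
    PySem.Dict.empty (fun a _ => PySem.Dict.contains_empty _) h
  simpa using this

-- ---- B side ----

lemma b_eq_canon (options : List (Int × Int)) :
    group_by_step_alt options = canon options := by
  show (PySem.Dict.ofList (PySem.List.sorted
      (options.foldl (fun d p => d.modify p.2 [] (fun l => l ++ [p.1]))
        PySem.Dict.empty).items (fun item => item.1))).items = canon options
  have hkeys : (options.foldl (fun d p => d.modify p.2 [] (fun l => l ++ [p.1]))
      PySem.Dict.empty).keys = PySem.Set.ofList (options.map (fun y => y.2)) := by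
    exact PySem.Dict.keys_foldl_modify_key options (fun p => p.2) []
      (fun _ p => fun l => l ++ [p.1]) PySem.Dict.empty
  have hnodup : (options.foldl (fun d p => d.modify p.2 [] (fun l => l ++ [p.1]))
      PySem.Dict.empty).keys.Nodup := by
    rw [hkeys]; exact PySem.Set.nodup_ofList _
  have hgetD : ∀ k, (options.foldl (fun d p => d.modify p.2 [] (fun l => l ++ [p.1]))
      PySem.Dict.empty).getD k [] = canonGroup options k := by
    intro k
    have hswap : options.foldl (fun d p => d.modify p.2 [] (fun l => l ++ [p.1]))
        PySem.Dict.empty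
        = (options.map (fun p => (p.2, p.1))).foldl
            (fun d p => d.modify p.1 [] (fun l => l ++ [p.2])) PySem.Dict.empty := by
      rw [List.foldl_map]
    rw [hswap, PySem.Dict.getD_foldl_modify_append]
    simp [canonGroup, List.filter_map, Function.comp_def]
  have hitems : (options.foldl (fun d p => d.modify p.2 [] (fun l => l ++ [p.1]))
      PySem.Dict.empty).items
      = (PySem.Set.ofList (options.map (fun y => y.2))).map
          (fun k => (k, canonGroup options k)) := by
    rw [PySem.Dict.items_eq_map_keys _ hnodup [], hkeys]
    exact List.map_congr_left (fun k _ => by rw [hgetD])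
  rw [hitems]
  have hsorted : PySem.List.sorted
      ((PySem.Set.ofList (options.map (fun y => y.2))).map
        (fun k => (k, canonGroup options k))) (fun item => item.1) = canon options := by
    apply PySem.List.sorted_eq_of_perm_of_pairwise_lt
    · exact List.Perm.map _ (PySem.List.sorted_perm _ _ _)
    · exact canon_pairwise_lt options
  rw [hsorted, items_ofList_nodup _ (canon_keys_nodup options)]

-- ---- A side ----

lemma rest_key_gt (x : Int × Int) (xs : List (Int × Int))
    (h : (x :: xs).Pairwise (fun a b => a.2 ≤ b.2)) :
    ∀ y ∈ xs.dropWhile (fun y => y.2 == x.2), x.2 < y.2 := by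
  induction xs with
  | nil => simp
  | cons z zs ih =>
    rcases List.pairwise_cons.1 h with ⟨hx, hzs⟩
    rcases List.pairwise_cons.1 hzs with ⟨hz, hzs'⟩
    by_cases hcase : (z.2 == x.2) = true
    · rw [List.dropWhile_cons, if_pos hcase]
      exact ih (List.pairwise_cons.2 ⟨fun y hy => hx y (List.mem_cons_of_mem _ hy), hzs'⟩)
    · rw [List.dropWhile_cons, if_neg hcase]
      intro y hy
      have hxz : x.2 < z.2 := by
        have := hx z (List.mem_cons_self ..)
        have hne : ¬ z.2 = x.2 := by simpa using hcase
        omega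
      rcases List.mem_cons.1 hy with rfl | hy'
      · exact hxz
      · exact lt_of_lt_of_le hxz (hz y hy')

lemma mem_keys_pyGroupby (l : List (Int × Int)) (k : Int) :
    k ∈ (pyGroupby l).map (fun p => p.1) ↔ k ∈ l.map (fun y => y.2) := by
  induction l using pyGroupby.induct with
  | case1 => simp [pyGroupby]
  | case2 x xs ih =>
    rw [pyGroupby]
    conv_rhs => rw [show x :: xs
      = x :: (xs.takeWhile (fun y => y.2 == x.2) ++ xs.dropWhile (fun y => y.2 == x.2)) by
        rw [List.takeWhile_append_dropWhile]]
    simp only [List.map_cons, List.mem_cons, List.map_append, List.mem_append, ih]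
    constructor
    · rintro (rfl | h)
      · exact Or.inl rfl
      · exact Or.inr (Or.inr h)
    · rintro (rfl | h | h)
      · exact Or.inl rfl
      · rcases List.mem_map.1 h with ⟨y, hy, rfl⟩
        exact Or.inl (by simpa using List.mem_takeWhile_imp hy)
      · exact Or.inr h

lemma pyGroupby_keys_pairwise (l : List (Int × Int))
    (h : l.Pairwise (fun a b => a.2 ≤ b.2)) :
    ((pyGroupby l).map (fun p => p.1)).Pairwise (· < ·) := by
  induction l using pyGroupby.induct with
  | case1 => simp [pyGroupby]
  | case2 x xs ih =>
    have hrest : (xs.dropWhile (fun y => y.2 == x.2)).Pairwise (fun a b => a.2 ≤ b.2) :=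
      List.Pairwise.sublist ((List.dropWhile_sublist _).cons _) h
    rw [pyGroupby]
    refine List.pairwise_cons.2 ⟨?_, ih hrest⟩
    intro k hk
    rcases List.mem_map.1 ((mem_keys_pyGroupby _ k).1 hk) with ⟨y, hy, rfl⟩
    exact rest_key_gt x xs h y hy

lemma filter_cons_group (x : Int × Int) (xs : List (Int × Int))
    (h : (x :: xs).Pairwise (fun a b => a.2 ≤ b.2)) :
    (x :: xs).filter (fun y => y.2 == x.2)
      = x :: xs.takeWhile (fun y => y.2 == x.2) := by
  rw [List.filter_cons, if_pos (by simp)]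
  congr 1
  conv_lhs => rw [← List.takeWhile_append_dropWhile (p := fun y => y.2 == x.2) (l := xs)]
  rw [List.filter_append]
  have h1 : (xs.takeWhile (fun y => y.2 == x.2)).filter (fun y => y.2 == x.2)
      = xs.takeWhile (fun y => y.2 == x.2) :=
    List.filter_eq_self.2
      (fun y hy => List.mem_takeWhile_imp (p := fun (y : Int × Int) => y.2 == x.2) hy)
  have h2 : (xs.dropWhile (fun y => y.2 == x.2)).filter (fun y => y.2 == x.2) = [] :=
    List.filter_eq_nil_iff.2 (fun y hy => by
      have := rest_key_gt x xs h y hy; simp; omega)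
  rw [h1, h2, List.append_nil]

lemma pyGroupby_snd (l : List (Int × Int)) (h : l.Pairwise (fun a b => a.2 ≤ b.2)) :
    ∀ p ∈ pyGroupby l, p.2 = l.filter (fun y => y.2 == p.1) := by
  induction l using pyGroupby.induct with
  | case1 => simp [pyGroupby]
  | case2 x xs ih =>
    have hrest : (xs.dropWhile (fun y => y.2 == x.2)).Pairwise (fun a b => a.2 ≤ b.2) :=
      List.Pairwise.sublist ((List.dropWhile_sublist _).cons _) h
    rw [pyGroupby]
    intro p hp0
    rcases List.mem_cons.1 hp0 with rfl | hp
    · exact (filter_cons_group x xs h).symm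
    · have hkey : x.2 < p.1 := by
        have hmem : p.1 ∈ (pyGroupby (xs.dropWhile (fun y => y.2 == x.2))).map
            (fun p => p.1) := List.mem_map.2 ⟨p, hp, rfl⟩
        rcases List.mem_map.1 ((mem_keys_pyGroupby _ p.1).1 hmem) with ⟨y, hy, hyeq⟩
        exact hyeq ▸ rest_key_gt x xs h y hy
      rw [ih hrest p hp]
      conv_rhs => rw [show x :: xs
        = x :: (xs.takeWhile (fun y => y.2 == x.2) ++ xs.dropWhile (fun y => y.2 == x.2)) by
          rw [List.takeWhile_append_dropWhile]]
      rw [List.filter_cons, if_neg (by simp; omega), List.filter_append]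
      have h1 : (xs.takeWhile (fun y => y.2 == x.2)).filter (fun y => y.2 == p.1) = [] :=
        List.filter_eq_nil_iff.2 (fun y hy => by
          have := List.mem_takeWhile_imp hy
          simp at this ⊢
          omega)
      rw [h1, List.nil_append]

-- stability of PySem.List.sorted: filtering by a fixed key value commutes with the sort
lemma pairwise_insertBy (x : Int × Int) (ys : List (Int × Int))
    (h : ys.Pairwise (fun a b => a.2 ≤ b.2)) :
    (PySem.List.insertBy (fun a b => decide (a.2 < b.2)) x ys).Pairwise
      (fun a b => a.2 ≤ b.2) := by
  induction ys with
  | nil => simp [PySem.List.insertBy]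
  | cons y ys ih =>
    rcases List.pairwise_cons.1 h with ⟨hy, hys⟩
    show (if (decide (x.2 < y.2)) = true then x :: y :: ys
        else y :: PySem.List.insertBy (fun a b => decide (a.2 < b.2)) x ys).Pairwise _
    split_ifs with hlt
    · simp only [decide_eq_true_eq] at hlt
      refine List.pairwise_cons.2 ⟨?_, h⟩
      intro z hz
      rcases List.mem_cons.1 hz with rfl | hz'
      · omega
      · exact le_trans (le_of_lt hlt) (hy z hz')
    · simp only [decide_eq_true_eq, not_lt] at hlt
      refine List.pairwise_cons.2 ⟨?_, ih hys⟩
      intro z hz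
      rcases (PySem.List.mem_insertBy _ _ _ _).1 hz with rfl | hz'
      · exact hlt
      · exact hy z hz'

lemma filter_insertBy (k : Int) (x : Int × Int) (ys : List (Int × Int))
    (h : ys.Pairwise (fun a b => a.2 ≤ b.2)) :
    (PySem.List.insertBy (fun a b => decide (a.2 < b.2)) x ys).filter
        (fun z => z.2 == k)
      = if (x.2 == k) = true then ys.filter (fun z => z.2 == k) ++ [x]
        else ys.filter (fun z => z.2 == k) := by
  induction ys with
  | nil =>
    show List.filter (fun z => z.2 == k) [x] = _
    rw [List.filter_cons]
    by_cases hxk : (x.2 == k) = true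
    · rw [if_pos hxk, if_pos hxk]; rfl
    · rw [if_neg hxk, if_neg hxk]
  | cons y ys ih =>
    rcases List.pairwise_cons.1 h with ⟨hy, hys⟩
    show (if (decide (x.2 < y.2)) = true then x :: y :: ys
        else y :: PySem.List.insertBy (fun a b => decide (a.2 < b.2)) x ys).filter
          (fun z => z.2 == k) = _
    by_cases hlt : x.2 < y.2
    · rw [if_pos (by simpa using hlt)]
      by_cases hxk : (x.2 == k) = true
      · have hnone : (y :: ys).filter (fun z => z.2 == k) = [] := by
          apply List.filter_eq_nil_iff.2
          intro z hz
          have hzge : y.2 ≤ z.2 := by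
            rcases List.mem_cons.1 hz with rfl | hz'
            · exact le_refl _
            · exact hy z hz'
          have hxk' : x.2 = k := by simpa using hxk
          simp only [beq_iff_eq]
          omega
        rw [if_pos hxk, List.filter_cons, if_pos hxk, hnone]
        rfl
      · rw [if_neg hxk, List.filter_cons, if_neg hxk]
    · rw [if_neg (by simpa using hlt)]
      rw [List.filter_cons, ih hys, List.filter_cons]
      by_cases hxk : (x.2 == k) = true <;> by_cases hyk : (y.2 == k) = true <;>
        simp [hxk, hyk]

lemma foldl_insertBy_filter (k : Int) (l acc : List (Int × Int))
    (h : acc.Pairwise (fun a b => a.2 ≤ b.2)) :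
    (l.foldl (fun acc x => PySem.List.insertBy
        (fun a b => decide (a.2 < b.2)) x acc) acc).filter (fun y => y.2 == k)
      = acc.filter (fun y => y.2 == k) ++ l.filter (fun y => y.2 == k) := by
  induction l generalizing acc with
  | nil => simp
  | cons x l ih =>
    rw [List.foldl_cons, ih _ (pairwise_insertBy x acc h), filter_insertBy k x acc h,
      List.filter_cons]
    by_cases hxk : (x.2 == k) = true <;> simp [hxk]

lemma filter_sorted (options : List (Int × Int)) (k : Int) :
    (PySem.List.sorted options (fun option => option.2)).filter (fun y => y.2 == k)
      = options.filter (fun y => y.2 == k) := by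
  rw [PySem.List.sorted_eq_foldl_insertBy options (fun option => option.2),
    foldl_insertBy_filter k options [] (by simp)]
  simp

lemma a_eq_canon (options : List (Int × Int)) :
    group_by_step options = canon options := by
  show (PySem.Dict.ofList
    ((pyGroupby (PySem.List.sorted options (fun option => option.2))).map
      (fun g => (g.1, g.2.map (fun o => o.1))))).items = canon options
  have hsl : (PySem.List.sorted options (fun option => option.2)).Pairwise
      (fun a b => a.2 ≤ b.2) := PySem.List.sorted_pairwise options (fun option => option.2)
  have hgl : (pyGroupby (PySem.List.sorted options (fun option => option.2))).map
      (fun g => (g.1, g.2.map (fun o => o.1))) = canon options := by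
    have hstep : (pyGroupby (PySem.List.sorted options (fun option => option.2))).map
        (fun g => (g.1, g.2.map (fun o => o.1)))
        = ((pyGroupby (PySem.List.sorted options (fun option => option.2))).map
            (fun p => p.1)).map (fun k => (k, canonGroup options k)) := by
      rw [List.map_map]
      refine List.map_congr_left (fun g hg => ?_)
      have h2 := pyGroupby_snd _ hsl g hg
      simp only [Function.comp_apply]
      rw [h2, filter_sorted]
      rfl
    have hkeys : canonKeys options
        = (pyGroupby (PySem.List.sorted options (fun option => option.2))).map
            (fun p => p.1) := by
      apply PySem.List.sorted_eq_of_perm_of_pairwise_lt _ _ (fun x => x)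
      · refine (List.perm_ext_iff_of_nodup ?_ ?_).2 ?_
        · exact List.Pairwise.imp (fun {a b} h => ne_of_lt h)
            (pyGroupby_keys_pairwise _ hsl)
        · exact PySem.Set.nodup_ofList _
        · intro k
          rw [mem_keys_pyGroupby, PySem.Set.mem_ofList]
          constructor
          · intro hk
            rcases List.mem_map.1 hk with ⟨y, hy, rfl⟩
            exact List.mem_map.2 ⟨y, (PySem.List.sorted_perm options _ false).mem_iff.1 hy, rfl⟩
          · intro hk
            rcases List.mem_map.1 hk with ⟨y, hy, rfl⟩
            exact List.mem_map.2 ⟨y, (PySem.List.sorted_perm options _ false).mem_iff.2 hy, rfl⟩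
      · exact pyGroupby_keys_pairwise _ hsl
    rw [hstep, canon, hkeys]
  rw [hgl, items_ofList_nodup _ (canon_keys_nodup options)]

-- ===== VERDICT (by name: the statement is the Claim_ definition above) =====
theorem group_by_step_spec : Claim_equal_group_by_step := by
  intro options _
  unfold Spec_group_by_step
  rw [a_eq_canon, b_eq_canon]
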